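-- pv_equiv track=rewrite | github.com/alpha-src/AlgorithmTest | weirdStr.py | solution
-- ===== SOURCE A (Python) =====
-- def solution(s):
--     s = s.lower()
--     strList = list(s)
--     ans = ''
--
--     cnt = 0
--
--     for char in strList:
--         ans += char
--         if char == ' ':
--             cnt = 0
--             continue
--
--         if cnt%2==0:
--             ans = ans[:-1]
--             ans += char.upper()
--
--         cnt +=1
--
--     return ans
-- ===== SOURCE B (Python) =====
-- def solution(s):
--     words = s.lower().split(' ')
--     return ' '.join(
--         ''.join(c.upper() if i % 2 == 0 else c for i, c in enumerate(w))
--         for w in words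
--     )
-- ===== Notes on version B (the rewrite author's own statement) =====
-- stated objective: faster
-- what changed: Replaces the flat char loop with a counter and repeated ans[:-1] string re-slicing by splitting on the single-space separator into words, a per-word even-index uppercase mapping via enumerate, and one join.
import Mathlib
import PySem

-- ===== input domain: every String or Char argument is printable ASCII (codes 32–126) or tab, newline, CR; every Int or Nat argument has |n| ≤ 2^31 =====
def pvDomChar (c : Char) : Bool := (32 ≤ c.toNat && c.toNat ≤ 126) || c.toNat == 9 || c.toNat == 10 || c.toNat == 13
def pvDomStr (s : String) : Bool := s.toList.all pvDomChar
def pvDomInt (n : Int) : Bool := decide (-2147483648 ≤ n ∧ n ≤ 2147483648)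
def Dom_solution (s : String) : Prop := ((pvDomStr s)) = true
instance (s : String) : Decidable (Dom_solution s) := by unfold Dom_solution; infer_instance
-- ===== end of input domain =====

-- B replaces the flat char loop by splitting on the single-space separator, per-word even-index uppercasing via enumerate, then one join.

-- ===== PORT A =====
-- one loop iteration of A: ans += char; space resets cnt; even cnt replaces the
-- last char by its uppercase; cnt += 1
def solutionStep (st : List Char × Nat) (c : Char) : List Char × Nat :=
  let ans := st.1 ++ [c]
  if c == ' ' then (ans, 0)
  else
    let ans := if st.2 % 2 == 0 then ans.dropLast ++ [PySem.Chars.upperChar c] else ans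
    (ans, st.2 + 1)

def solution (s : String) : String :=
  let strList := (PySem.Str.lower s).toList
  String.ofList (strList.foldl solutionStep ([], 0)).1

-- ===== PORT B =====
def solution_alt (s : String) : String :=
  let words := PySem.Chars.splitOn (PySem.Str.lower s).toList [' ']
  String.ofList (PySem.Chars.join [' ']
    (words.map (fun w =>
      (PySem.List.enumerate w).map
        (fun ic => if ic.1 % 2 == 0 then PySem.Chars.upperChar ic.2 else ic.2))))

-- ===== PRECONDITION & SPEC =====
def Spec_solution (s : String) (out : String) : Prop := out = solution_alt s
instance (s : String) (out : String) : Decidable (Spec_solution s out) := by unfold Spec_solution; infer_instance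

-- ===== CLAIM (what is proved, stated in full; the proofs are below) =====
def Claim_equal_solution : Prop := ∀ (s : String), Dom_solution s → Spec_solution s (solution s)

-- ===== LEMMAS AND PROOFS =====

-- what A's loop appends after the already-built prefix, from counter n
def fA : List Char → Nat → List Char
  | [], _ => []
  | c :: t, n =>
    if c == ' ' then ' ' :: fA t 0
    else (if n % 2 == 0 then PySem.Chars.upperChar c else c) :: fA t (n + 1)

-- prepend a prefix onto the first word
def prependHead (p : List Char) : List (List Char) → List (List Char)
  | [] => [p]
  | w :: ws => (p ++ w) :: ws

-- structural version of splitOn on a single-space separator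
def split1 : List Char → List (List Char)
  | [] => [[]]
  | c :: t => if c == ' ' then [] :: split1 t else prependHead [c] (split1 t)

-- even-index uppercase of a word, indices starting at n
def tr : List Char → Nat → List Char
  | [], _ => []
  | c :: t, n => (if n % 2 == 0 then PySem.Chars.upperChar c else c) :: tr t (n + 1)

theorem split1_ne_nil (l : List Char) : split1 l ≠ [] := by
  cases l with
  | nil => simp [split1]
  | cons c t =>
    simp only [split1]
    split
    · simp
    · cases h : split1 t <;> simp [prependHead]

theorem prependHead_nil (ws : List (List Char)) (h : ws ≠ []) : prependHead [] ws = ws := by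
  cases ws with
  | nil => exact absurd rfl h
  | cons w t => simp [prependHead]

theorem prependHead_prependHead (p q : List Char) (ws : List (List Char)) :
    prependHead p (prependHead q ws) = prependHead (p ++ q) ws := by
  cases ws <;> simp [prependHead]

theorem go_spec (fuel : Nat) (l cur : List Char) (acc : List (List Char))
    (h : l.length < fuel) :
    PySem.Chars.splitOn.go [' '] fuel l cur acc
      = acc.reverse ++ prependHead cur.reverse (split1 l) := by
  induction fuel generalizing l cur acc with
  | zero => omega
  | succ n ih =>
    cases l with
    | nil =>
      simp [PySem.Chars.splitOn.go, split1, prependHead]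
    | cons c rest =>
      simp only [PySem.Chars.splitOn.go]
      by_cases hc : c = ' '
      · subst hc
        have hpre : [' '].isPrefixOf (' ' :: rest) = true := by simp [List.isPrefixOf]
        rw [if_pos hpre]
        simp only [List.length_cons] at h
        rw [ih _ _ _ (by simpa using Nat.lt_of_succ_lt_succ h)]
        have hdrop : List.drop [' '].length (' ' :: rest) = rest := by simp
        rw [hdrop, List.reverse_nil, prependHead_nil _ (split1_ne_nil rest)]
        have hsp1 : split1 (' ' :: rest) = [] :: split1 rest := by simp [split1]
        rw [hsp1]
        cases hsp : split1 rest with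
        | nil => exact absurd hsp (split1_ne_nil rest)
        | cons w ws => simp [prependHead]
      · have hpre : [' '].isPrefixOf (c :: rest) = false := by
          simp [List.isPrefixOf]
          exact fun h' => hc h'.symm
        rw [if_neg (by simp [hpre])]
        simp only [List.length_cons] at h
        rw [ih _ _ _ (Nat.lt_of_succ_lt_succ h)]
        have hb : (c == ' ') = false := by simp [hc]
        simp only [split1, hb, Bool.false_eq_true, if_false]
        rw [prependHead_prependHead]
        simp

theorem splitOn_eq_split1 (l : List Char) :
    PySem.Chars.splitOn l [' '] = split1 l := by
  unfold PySem.Chars.splitOn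
  rw [go_spec _ _ _ _ (Nat.lt_succ_self _)]
  simp [prependHead_nil _ (split1_ne_nil l)]

-- A's loop, unrolled: the fold appends fA
theorem foldl_step (l : List Char) (ans : List Char) (n : Nat) :
    (l.foldl solutionStep (ans, n)).1 = ans ++ fA l n := by
  induction l generalizing ans n with
  | nil => simp [fA]
  | cons c t ih =>
    rw [List.foldl_cons]
    by_cases hc : c = ' '
    · subst hc
      have hs : solutionStep (ans, n) ' ' = (ans ++ [' '], 0) := by
        simp [solutionStep]
      rw [hs, ih]
      simp [fA]
    · by_cases hn : n % 2 = 0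
      · have hs : solutionStep (ans, n) c = (ans ++ [PySem.Chars.upperChar c], n + 1) := by
          simp [solutionStep, hc, hn]
        rw [hs, ih]
        simp [fA, hc, hn]
      · have hs : solutionStep (ans, n) c = (ans ++ [c], n + 1) := by
          simp [solutionStep, hc, hn]
        rw [hs, ih]
        simp [fA, hc, hn]

-- B's comprehension over enumerate is tr
theorem enumerate_map_tr (w : List Char) (k : Nat) :
    (PySem.List.enumerate w (k : Int)).map
        (fun ic => if ic.1 % 2 == 0 then PySem.Chars.upperChar ic.2 else ic.2)
      = tr w k := by
  induction w generalizing k with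
  | nil => simp [PySem.List.enumerate, tr]
  | cons c t ih =>
    rw [PySem.List.enumerate_cons]
    have h2 : ((k : Int) % 2 == 0) = (k % 2 == 0) := by
      by_cases h : k % 2 = 0
      · simp [h, show (k : Int) % 2 = 0 by omega]
      · simp [h, show ¬ ((k : Int) % 2 = 0) by omega]
    have hk1 : (k : Int) + 1 = ((k + 1 : Nat) : Int) := by push_cast; ring
    simp only [List.map_cons, tr, h2, hk1, ih]

-- join on a word whose first char is fixed
theorem join_cons_head (a : Char) (x : List Char) (ws : List (List Char)) :
    PySem.Chars.join [' '] ((a :: x) :: ws) = a :: PySem.Chars.join [' '] (x :: ws) := by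
  cases ws <;> simp [PySem.Chars.join, List.intercalate]

theorem join_empty_head (ws : List (List Char)) (h : ws ≠ []) :
    PySem.Chars.join [' '] ([] :: ws) = ' ' :: PySem.Chars.join [' '] ws := by
  cases ws with
  | nil => exact absurd rfl h
  | cons w t => simp [PySem.Chars.join, List.intercalate]

-- first word mapped from offset n, the rest from 0
def mapFirst (n : Nat) : List (List Char) → List (List Char)
  | [] => []
  | w :: ws => tr w n :: ws.map (tr · 0)

theorem mapFirst_zero (ws : List (List Char)) : mapFirst 0 ws = ws.map (tr · 0) := by
  cases ws <;> simp [mapFirst]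

-- the heart: A's suffix from counter n = join of the per-word mapping
theorem fA_eq_join (l : List Char) (n : Nat) :
    fA l n = PySem.Chars.join [' '] (mapFirst n (split1 l)) := by
  induction l generalizing n with
  | nil => simp [fA, split1, mapFirst, tr, PySem.Chars.join, List.intercalate]
  | cons c t ih =>
    obtain ⟨w, ws, hw⟩ : ∃ w ws, split1 t = w :: ws := by
      cases h : split1 t with
      | nil => exact absurd h (split1_ne_nil t)
      | cons w ws => exact ⟨w, ws, rfl⟩
    by_cases hc : c = ' '
    · subst hc
      have hfa : fA (' ' :: t) n = ' ' :: fA t 0 := by simp [fA]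
      have hsp : split1 (' ' :: t) = [] :: w :: ws := by simp [split1, hw]
      rw [hfa, ih 0, mapFirst_zero, hsp]
      have hmf : mapFirst n ([] :: w :: ws) = [] :: (w :: ws).map (tr · 0) := by
        simp [mapFirst, tr]
      rw [hmf, join_empty_head _ (by simp), hw]
    · have hfa : fA (c :: t) n
          = (if n % 2 == 0 then PySem.Chars.upperChar c else c) :: fA t (n + 1) := by
        simp [fA, hc]
      have hsp : split1 (c :: t) = (c :: w) :: ws := by
        simp [split1, hc, hw, prependHead]
      rw [hfa, hsp]
      have htr : tr (c :: w) n
          = (if n % 2 == 0 then PySem.Chars.upperChar c else c) :: tr w (n + 1) := rfl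
      have hmf : mapFirst n ((c :: w) :: ws) = tr (c :: w) n :: ws.map (tr · 0) := rfl
      rw [hmf, htr, join_cons_head, ih (n + 1), hw]
      rfl

-- ===== VERDICT (by name: the statement is the Claim_ definition above) =====
theorem lists_eq (l : List Char) :
    (l.foldl solutionStep ([], 0)).1
      = PySem.Chars.join [' '] ((PySem.Chars.splitOn l [' ']).map (fun w =>
          (PySem.List.enumerate w).map
            (fun ic => if ic.1 % 2 == 0 then PySem.Chars.upperChar ic.2 else ic.2))) := by
  rw [splitOn_eq_split1, foldl_step]
  simp only [List.nil_append]
  rw [fA_eq_join, mapFirst_zero]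
  congr 1
  apply List.map_congr_left
  intro w _
  have h := enumerate_map_tr w 0
  simpa using h.symm

theorem solution_spec : Claim_equal_solution := by
  intro s _
  unfold Spec_solution solution solution_alt
  exact congrArg String.ofList (lists_eq _)
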